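-- pv_equiv track=rewrite | github.com/Jo-Chang/BaekjoonHub | 백준/Silver/1652. 누울 자리를 찾아라/누울 자리를 찾아라.py | get_positions_num
-- ===== SOURCE A (Python) =====
-- def get_positions_num(lst_):
--     ans_row, ans_col = 0, 0
--     len_ = len(lst_)
--
--
--     for i in range(len_):
--         accumulate1 = 0
--         accumulate2 = 0
--         for j in range(len_):
--             # width count
--             if lst_[i][j] == "X":
--                 if accumulate1 > 1:
--                     ans_row += 1
--                 accumulate1 = 0
--             else:
--                 accumulate1 += 1
--
--             if lst_[j][i] == "X":
--                 if accumulate2 > 1: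
--                     ans_col += 1
--                 accumulate2 = 0
--             else:
--                 accumulate2 += 1
--
--         if accumulate1 > 1:
--             ans_row += 1
--         if accumulate2 > 1:
--             ans_col += 1
--
--     return ans_row, ans_col
-- ===== SOURCE B (Python) =====
-- def get_positions_num(lst_):
--     n = len(lst_)
--
--     def count_line(line):
--         # count run STARTS: adjacent non-"X" pairs whose left cell begins a run
--         total = 0
--         prev = "X"
--         for a, b in zip(line, line[1:]):
--             if a != "X" and b != "X" and prev == "X":
--                 total += 1
--             prev = a
--         return total
--
--     rows = sum(count_line([lst_[i][j] for j in range(n)]) for i in range(n))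
--     cols = sum(count_line([lst_[j][i] for j in range(n)]) for i in range(n))
--     return rows, cols
-- ===== Notes on version B (the rewrite author's own statement) =====
-- stated objective: alternative
-- what changed: Replaces A's single interleaved double loop with run-length accumulators and post-loop fixups by two independent passes (rows, then columns) that count run STARTS: adjacent non-'X' pairs preceded by 'X' or the line start, with no accumulator and no end-of-line correction.
import Mathlib
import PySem

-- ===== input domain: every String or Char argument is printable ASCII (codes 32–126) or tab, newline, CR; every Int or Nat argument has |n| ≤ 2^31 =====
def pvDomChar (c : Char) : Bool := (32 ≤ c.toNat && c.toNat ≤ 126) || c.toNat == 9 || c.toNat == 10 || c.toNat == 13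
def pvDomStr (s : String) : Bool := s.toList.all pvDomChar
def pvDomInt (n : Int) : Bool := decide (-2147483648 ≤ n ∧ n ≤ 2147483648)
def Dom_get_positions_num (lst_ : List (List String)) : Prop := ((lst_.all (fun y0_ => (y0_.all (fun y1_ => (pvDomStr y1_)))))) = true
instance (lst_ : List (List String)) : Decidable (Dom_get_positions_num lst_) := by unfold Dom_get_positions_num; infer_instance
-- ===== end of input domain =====

-- B counts the runs of length ≥ 2 differently (by their starting pair instead of by a
-- running length accumulator), in two separate passes over rows and over columns.

-- ===== PORT A =====
-- cell lookup lst_[i][j] (total via defaults; in-range whenever Pre_ holds)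
def pvCell (lst_ : List (List String)) (i j : Nat) : String := (lst_.getD i []).getD j ""

-- one accumulator update of A's inner loop body (used once for the row state, once for the column state)
def pvStepA (p : Int × Int) (c : String) : Int × Int :=
  if c = "X" then (if p.2 > 1 then p.1 + 1 else p.1, 0) else (p.1, p.2 + 1)

def get_positions_num (lst_ : List (List String)) : Int × Int :=
  let len_ := lst_.length
  (List.range len_).foldl
    (fun (ans : Int × Int) i =>
      let s := (List.range len_).foldl
        (fun (s : Int × Int × Int × Int) j =>
          let r := pvStepA (s.1, s.2.2.1) (pvCell lst_ i j)
          let c := pvStepA (s.2.1, s.2.2.2) (pvCell lst_ j i)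
          (r.1, c.1, r.2, c.2))
        (ans.1, ans.2, 0, 0)
      (if s.2.2.1 > 1 then s.1 + 1 else s.1, if s.2.2.2 > 1 then s.2.1 + 1 else s.2.1))
    ((0 : Int), (0 : Int))

-- ===== PORT B =====
-- count_line of Source B: fold over zip(line, line[1:]) with state (total, prev)
def pvCountLine (line : List String) : Int :=
  ((line.zip (line.drop 1)).foldl
    (fun (st : Int × String) p =>
      (if p.1 ≠ "X" ∧ p.2 ≠ "X" ∧ st.2 = "X" then st.1 + 1 else st.1, p.1))
    (0, "X")).1

def get_positions_num_alt (lst_ : List (List String)) : Int × Int :=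
  let n := lst_.length
  ((List.range n).foldl (fun acc i => acc + pvCountLine ((List.range n).map (fun j => pvCell lst_ i j))) 0,
   (List.range n).foldl (fun acc i => acc + pvCountLine ((List.range n).map (fun j => pvCell lst_ j i))) 0)

-- ===== PRECONDITION & SPEC =====
-- Pre_: Python A raises IndexError when some row is shorter than the number of rows; both programs raise exactly there.
def Pre_get_positions_num (lst_ : List (List String)) : Prop :=
  ∀ row ∈ lst_, lst_.length ≤ row.length
instance (lst_ : List (List String)) : Decidable (Pre_get_positions_num lst_) := by unfold Pre_get_positions_num; infer_instance

def pvWitness_get_positions_num : List (List String) := [[".", "X"], [".", "."]]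

def Spec_get_positions_num (lst_ : List (List String)) (out : Int × Int) : Prop := out = get_positions_num_alt lst_
instance (lst_ : List (List String)) (out : Int × Int) : Decidable (Spec_get_positions_num lst_ out) := by unfold Spec_get_positions_num; infer_instance

-- ===== CLAIM (what is proved, stated in full; the proofs are below) =====
def Claim_equal_get_positions_num : Prop := ∀ (lst_ : List (List String)), Dom_get_positions_num lst_ → Pre_get_positions_num lst_ → Spec_get_positions_num lst_ (get_positions_num lst_)

-- ===== LEMMAS AND PROOFS =====

-- A's per-line run counter, written as structural recursion on the line with accumulator a
def pvR (l : List String) (a : Int) : Int :=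
  match l with
  | [] => if a > 1 then 1 else 0
  | c :: cs => if c = "X" then (if a > 1 then 1 else 0) + pvR cs 0 else pvR cs (a + 1)

-- B's per-line run-start counter, structurally, with the Bool flag "previous cell was 'X' (or line start)"
def pvP (l : List String) (f : Bool) : Int :=
  match l with
  | [] => 0
  | [_] => 0
  | x :: y :: t => (if x ≠ "X" ∧ y ≠ "X" ∧ f = true then 1 else 0) + pvP (y :: t) (decide (x = "X"))

-- boundary correction relating pvR with a pending accumulator to pvP
def pvExt (a : Int) (h : String) : Int :=
  if 1 < a then 1 else if a = 1 ∧ h ≠ "X" then 1 else 0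

lemma pvP_cons2 (x y : String) (t : List String) (f : Bool) :
    pvP (x :: y :: t) f
      = (if x ≠ "X" ∧ y ≠ "X" ∧ f = true then 1 else 0) + pvP (y :: t) (decide (x = "X")) := rfl

lemma pvL1 (l : List String) : ∀ (ans a : Int),
    (if (l.foldl pvStepA (ans, a)).2 > 1 then (l.foldl pvStepA (ans, a)).1 + 1
     else (l.foldl pvStepA (ans, a)).1) = ans + pvR l a := by
  induction l with
  | nil => intro ans a; simp only [List.foldl_nil, pvR]; split_ifs <;> omega
  | cons c cs ih =>
    intro ans a
    simp only [List.foldl_cons, pvR, pvStepA]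
    by_cases hc : c = "X"
    · simp only [hc, if_true, ite_true, if_pos rfl]
      rw [ih]; split_ifs <;> omega
    · simp only [hc, if_false, ite_false, if_neg hc]
      rw [ih]

lemma pvL2 (l : List String) : ∀ (a : Int), 0 ≤ a →
    pvR l a = pvP l (decide (a = 0)) + pvExt a (l.head?.getD "X") := by
  induction l with
  | nil =>
    intro a ha
    simp only [pvR, pvP, pvExt, List.head?_nil, Option.getD_none]
    split_ifs with h1 h2 <;> first | omega | (exact absurd rfl h2.2)
  | cons x xs ih =>
    intro a ha
    by_cases hx : x = "X"
    · cases xs with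
      | nil =>
        simp only [pvR, pvP, pvExt, hx, if_true, List.head?_cons, Option.getD_some]
        split_ifs <;> simp_all <;> omega
      | cons y t =>
        have h1 := ih 0 le_rfl
        simp only [decide_true] at h1
        rw [show pvR (x :: y :: t) a = (if a > 1 then 1 else 0) + pvR (y :: t) 0 from by simp [pvR, hx]]
        rw [h1, pvP_cons2]
        simp only [hx, decide_true, pvExt, List.head?_cons, Option.getD_some]
        have : ¬((x : String) ≠ "X" ∧ y ≠ "X" ∧ True) := by simp [hx]
        split_ifs <;> simp_all <;> omega
    · cases xs with
      | nil =>
        simp only [pvR, pvP, pvExt, hx, if_false, List.head?_cons, Option.getD_some]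
        split_ifs <;> simp_all <;> omega
      | cons y t =>
        have h1 := ih (a + 1) (by omega)
        have hz : (decide (a + 1 = 0)) = false := by simp; omega
        rw [hz] at h1
        rw [show pvR (x :: y :: t) a = pvR (y :: t) (a + 1) from by simp [pvR, hx]]
        rw [h1, pvP_cons2]
        have hfx : (decide (x = "X")) = false := by simp [hx]
        rw [hfx]
        simp only [pvExt, List.head?_cons, Option.getD_some]
        by_cases hy : y = "X"
        · simp only [hy]
          have c1 : ¬((x:String) ≠ "X" ∧ ("X":String) ≠ "X" ∧ (decide (a = 0)) = true) := by simp
          rw [if_neg c1]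
          have c2 : ¬(("X":String) ≠ "X" ∧ (y::t).head?.getD "X" ≠ "X") := by simp
          split_ifs <;> simp_all <;> omega
        · by_cases ha0 : a = 0
          · subst ha0
            simp only [decide_true]
            split_ifs <;> simp_all <;> omega
          · have hna : (decide (a = 0)) = false := by simp [ha0]
            rw [hna]
            simp only [Bool.false_eq_true, and_false, if_false]
            split_ifs <;> simp_all <;> omega

lemma pvL4 (line : List String) : ∀ (prev : String) (total : Int),
    ((line.zip (line.drop 1)).foldl
      (fun (st : Int × String) p =>
        (if p.1 ≠ "X" ∧ p.2 ≠ "X" ∧ st.2 = "X" then st.1 + 1 else st.1, p.1))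
      (total, prev)).1 = total + pvP line (decide (prev = "X")) := by
  induction line with
  | nil => intro prev total; simp [pvP]
  | cons x xs ih =>
    intro prev total
    cases xs with
    | nil => simp [pvP]
    | cons y t =>
      simp only [List.drop_one, List.tail_cons] at ih ⊢
      rw [show ((x :: y :: t).zip (y :: t)) = (x, y) :: ((y :: t).zip t) from rfl]
      rw [List.foldl_cons]
      dsimp only
      rw [ih x]
      rw [pvP_cons2]
      by_cases hx : x = "X" <;> by_cases hy : y = "X" <;> by_cases hp : prev = "X" <;>
        simp [hx, hy, hp] <;> omega

lemma pvKey (line : List String) : pvCountLine line = pvR line 0 := by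
  unfold pvCountLine
  rw [pvL4 line "X" 0, pvL2 line 0 le_rfl]
  simp [pvExt]

lemma pvSplit (lst_ : List (List String)) (i : Nat) : ∀ (js : List Nat) (ansr ansc a1 a2 : Int),
    js.foldl
      (fun (s : Int × Int × Int × Int) j =>
        let r := pvStepA (s.1, s.2.2.1) (pvCell lst_ i j)
        let c := pvStepA (s.2.1, s.2.2.2) (pvCell lst_ j i)
        (r.1, c.1, r.2, c.2))
      (ansr, ansc, a1, a2)
    = ((js.foldl (fun p j => pvStepA p (pvCell lst_ i j)) (ansr, a1)).1,
       (js.foldl (fun q j => pvStepA q (pvCell lst_ j i)) (ansc, a2)).1,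
       (js.foldl (fun p j => pvStepA p (pvCell lst_ i j)) (ansr, a1)).2,
       (js.foldl (fun q j => pvStepA q (pvCell lst_ j i)) (ansc, a2)).2) := by
  intro js
  induction js with
  | nil => intro ansr ansc a1 a2; rfl
  | cons j js ih =>
    intro ansr ansc a1 a2
    simp only [List.foldl_cons]
    rw [ih]

lemma pvLine (cell : Nat → String) (n : Nat) (r : Int) :
    (if ((List.range n).foldl (fun p j => pvStepA p (cell j)) (r, 0)).2 > 1
     then ((List.range n).foldl (fun p j => pvStepA p (cell j)) (r, 0)).1 + 1
     else ((List.range n).foldl (fun p j => pvStepA p (cell j)) (r, 0)).1)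
    = r + pvCountLine ((List.range n).map cell) := by
  have hr := pvL1 ((List.range n).map cell) r 0
  rw [List.foldl_map] at hr
  rw [pvKey]
  exact hr

lemma pvOuter (lst_ : List (List String)) (n : Nat) : ∀ (is_ : List Nat) (r c : Int),
    is_.foldl
      (fun (ans : Int × Int) i =>
        (if ((List.range n).foldl
              (fun (s : Int × Int × Int × Int) j =>
                ((pvStepA (s.1, s.2.2.1) (pvCell lst_ i j)).1, (pvStepA (s.2.1, s.2.2.2) (pvCell lst_ j i)).1,
                 (pvStepA (s.1, s.2.2.1) (pvCell lst_ i j)).2, (pvStepA (s.2.1, s.2.2.2) (pvCell lst_ j i)).2))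
              (ans.1, ans.2, 0, 0)).2.2.1 > 1
         then ((List.range n).foldl
              (fun (s : Int × Int × Int × Int) j =>
                ((pvStepA (s.1, s.2.2.1) (pvCell lst_ i j)).1, (pvStepA (s.2.1, s.2.2.2) (pvCell lst_ j i)).1,
                 (pvStepA (s.1, s.2.2.1) (pvCell lst_ i j)).2, (pvStepA (s.2.1, s.2.2.2) (pvCell lst_ j i)).2))
              (ans.1, ans.2, 0, 0)).1 + 1
         else ((List.range n).foldl
              (fun (s : Int × Int × Int × Int) j =>
                ((pvStepA (s.1, s.2.2.1) (pvCell lst_ i j)).1, (pvStepA (s.2.1, s.2.2.2) (pvCell lst_ j i)).1,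
                 (pvStepA (s.1, s.2.2.1) (pvCell lst_ i j)).2, (pvStepA (s.2.1, s.2.2.2) (pvCell lst_ j i)).2))
              (ans.1, ans.2, 0, 0)).1,
         if ((List.range n).foldl
              (fun (s : Int × Int × Int × Int) j =>
                ((pvStepA (s.1, s.2.2.1) (pvCell lst_ i j)).1, (pvStepA (s.2.1, s.2.2.2) (pvCell lst_ j i)).1,
                 (pvStepA (s.1, s.2.2.1) (pvCell lst_ i j)).2, (pvStepA (s.2.1, s.2.2.2) (pvCell lst_ j i)).2))
              (ans.1, ans.2, 0, 0)).2.2.2 > 1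
         then ((List.range n).foldl
              (fun (s : Int × Int × Int × Int) j =>
                ((pvStepA (s.1, s.2.2.1) (pvCell lst_ i j)).1, (pvStepA (s.2.1, s.2.2.2) (pvCell lst_ j i)).1,
                 (pvStepA (s.1, s.2.2.1) (pvCell lst_ i j)).2, (pvStepA (s.2.1, s.2.2.2) (pvCell lst_ j i)).2))
              (ans.1, ans.2, 0, 0)).2.1 + 1
         else ((List.range n).foldl
              (fun (s : Int × Int × Int × Int) j =>
                ((pvStepA (s.1, s.2.2.1) (pvCell lst_ i j)).1, (pvStepA (s.2.1, s.2.2.2) (pvCell lst_ j i)).1,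
                 (pvStepA (s.1, s.2.2.1) (pvCell lst_ i j)).2, (pvStepA (s.2.1, s.2.2.2) (pvCell lst_ j i)).2))
              (ans.1, ans.2, 0, 0)).2.1))
      (r, c)
    = (is_.foldl (fun acc i => acc + pvCountLine ((List.range n).map (fun j => pvCell lst_ i j))) r,
       is_.foldl (fun acc i => acc + pvCountLine ((List.range n).map (fun j => pvCell lst_ j i))) c) := by
  intro is_
  induction is_ with
  | nil => intro r c; rfl
  | cons i is_ ih =>
    intro r c
    simp only [List.foldl_cons]
    rw [pvSplit lst_ i (List.range n) r c 0 0]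
    dsimp only
    rw [pvLine (fun j => pvCell lst_ i j) n r, pvLine (fun j => pvCell lst_ j i) n c]
    rw [ih]

-- ===== VERDICT (by name: the statement is the Claim_ definition above) =====
theorem get_positions_num_spec : Claim_equal_get_positions_num := by
  intro lst_ _ _
  unfold Spec_get_positions_num get_positions_num get_positions_num_alt
  simp only []
  rw [pvOuter lst_ lst_.length (List.range lst_.length) 0 0]
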